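-- pv_equiv track=rewrite | github.com/mbsperry/isprinklr_esp | src/serialTester/test.py | fletcher16
-- ===== SOURCE A (Python) =====
-- def fletcher16(data):
--   sum1 = 0
--   sum2 = 0
--
--   for byte in data:
--       sum1 = (sum1 + byte) % 255
--       sum2 = (sum2 + sum1) % 255
--
--   checksum = (sum2 << 8) | sum1
--   return checksum
-- ===== SOURCE B (Python) =====
-- def fletcher16(data):
--     n = len(data)
--     sum1 = sum(data) % 255
--     sum2 = sum((n - i) * b for i, b in enumerate(data)) % 255
--     return (sum2 << 8) | sum1
-- ===== Notes on version B (the rewrite author's own statement) =====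
-- stated objective: alternative
-- what changed: Replaces the coupled running (sum1,sum2) recurrence with two independent closed-form sums: sum1 = sum(data) % 255 and sum2 = the positionally weighted sum((n-i)*b) % 255, combined at the end.
import Mathlib
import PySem

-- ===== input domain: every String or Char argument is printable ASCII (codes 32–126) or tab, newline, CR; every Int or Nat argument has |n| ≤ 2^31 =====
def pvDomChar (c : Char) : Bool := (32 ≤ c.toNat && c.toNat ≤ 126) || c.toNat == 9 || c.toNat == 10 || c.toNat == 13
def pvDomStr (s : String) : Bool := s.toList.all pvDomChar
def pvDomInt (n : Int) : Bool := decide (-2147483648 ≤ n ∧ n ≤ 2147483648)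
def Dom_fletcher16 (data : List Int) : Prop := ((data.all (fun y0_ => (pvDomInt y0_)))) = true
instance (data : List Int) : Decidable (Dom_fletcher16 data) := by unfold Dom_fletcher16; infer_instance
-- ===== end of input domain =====

-- B computes the same Fletcher-16 value via two independent whole-list sums (the plain sum and a
-- positionally weighted sum, each reduced mod 255 once) instead of A's coupled per-byte recurrence.

-- ===== PORT A =====
def fletcher16 (data : List Int) : Int :=
  let r := data.foldl (fun (p : Int × Int) byte =>
    let s1 := PySem.Int.mod (p.1 + byte) 255
    (s1, PySem.Int.mod (p.2 + s1) 255)) (0, 0)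
  PySem.Int.bor (r.2 <<< (8 : Nat)) r.1

-- ===== PORT B =====
def fletcher16_alt (data : List Int) : Int :=
  let n : Int := data.length
  let sum1 := PySem.Int.mod data.sum 255
  let sum2 := PySem.Int.mod (((PySem.List.enumerate data 0).map (fun p => (n - p.1) * p.2)).sum) 255
  PySem.Int.bor (sum2 <<< (8 : Nat)) sum1

-- ===== PRECONDITION & SPEC =====
def Spec_fletcher16 (data : List Int) (out : Int) : Prop := out = fletcher16_alt data
instance (data : List Int) (out : Int) : Decidable (Spec_fletcher16 data out) := by unfold Spec_fletcher16; infer_instance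

-- ===== CLAIM (what is proved, stated in full; the proofs are below) =====
def Claim_equal_fletcher16 : Prop := ∀ (data : List Int), Dom_fletcher16 data → Spec_fletcher16 data (fletcher16 data)

-- ===== LEMMAS AND PROOFS =====

-- shifting the enumeration start by 1 while raising the weight base by 1 keeps every weight
theorem fletcher16_shiftW (xs : List Int) (n s : Int) :
    ((PySem.List.enumerate xs (s + 1)).map (fun p => (n + 1 - p.1) * p.2)).sum
    = ((PySem.List.enumerate xs s).map (fun p => (n - p.1) * p.2)).sum := by
  induction xs generalizing s with
  | nil => simp [PySem.List.enumerate_nil]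
  | cons b xs ih =>
    simp only [PySem.List.enumerate_cons, List.map_cons, List.sum_cons, ih]
    have h : n + 1 - (s + 1) = n - s := by omega
    rw [h]

-- invariant of A's fold: for reduced accumulators the result is the plain sum and the
-- weighted sum of the list, each taken mod 255
theorem fletcher16_loop (xs : List Int) (s1 s2 : Int)
    (hs1 : s1 % 255 = s1) (hs2 : s2 % 255 = s2) :
    xs.foldl (fun (p : Int × Int) byte =>
        let t1 := PySem.Int.mod (p.1 + byte) 255
        (t1, PySem.Int.mod (p.2 + t1) 255)) (s1, s2)
    = (PySem.Int.mod (s1 + xs.sum) 255,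
       PySem.Int.mod (s2 + (xs.length : Int) * s1
          + ((PySem.List.enumerate xs 0).map (fun p => ((xs.length : Int) - p.1) * p.2)).sum) 255) := by
  have h255 : (0:Int) < 255 := by decide
  have hme : ∀ a : Int, a % 255 % 255 = a % 255 := fun a => Int.emod_emod_of_dvd a dvd_rfl
  induction xs generalizing s1 s2 with
  | nil =>
    simp only [List.foldl_nil, List.length_nil, PySem.List.enumerate_nil, List.map_nil,
      List.sum_nil, PySem.Int.mod_eq_emod_of_pos h255]
    rw [Prod.mk.injEq]
    push_cast
    constructor <;> omega
  | cons b xs ih =>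
    simp only [List.foldl_cons]
    rw [ih _ _ (by simp only [PySem.Int.mod_eq_emod_of_pos h255]; exact hme _)
             (by simp only [PySem.Int.mod_eq_emod_of_pos h255]; exact hme _)]
    simp only [PySem.List.enumerate_cons, List.map_cons, List.sum_cons, List.length_cons,
      PySem.Int.mod_eq_emod_of_pos h255]
    push_cast
    have hw := fletcher16_shiftW xs (xs.length : Int) 0
    norm_num at hw
    rw [hw]
    rw [Prod.mk.injEq]
    constructor
    · omega
    · generalize (xs.length : Int) = L
      generalize ((PySem.List.enumerate xs 0).map (fun p => (L - p.1) * p.2)).sum = W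
      have hLu : L * ((s1 + b) % 255) % 255 = (L * s1 + L * b) % 255 := by
        conv_lhs => rw [Int.mul_emod]
        rw [hme, ← Int.mul_emod, mul_add]
      have e1 : (L + 1) * s1 = L * s1 + s1 := by ring
      have e2 : (L + 1 - 0) * b = L * b + b := by ring
      rw [e1, e2]
      omega

-- ===== VERDICT (by name: the statement is the Claim_ definition above) =====
theorem fletcher16_spec : Claim_equal_fletcher16 := by
  intro data _
  unfold Spec_fletcher16 fletcher16 fletcher16_alt
  rw [fletcher16_loop data 0 0 (by decide) (by decide)]
  simp
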